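-- pv_equiv track=rewrite | github.com/wherby/code | contest/00000c443d154/c451/q4/t4.py | lexicographicallySmallestString
-- ===== SOURCE A (Python) =====
-- from functools import cache
--
-- def lexicographicallySmallestString(s: str) -> str:
--
--     def good(i,j):
--         if abs(ord(s[i]) - ord(s[j])) ==1 or abs(ord(s[i])-ord(s[j])) ==25:
--             return True
--
--     @cache
--     def isGood(i,j):
--         if j-i %2 ==0:
--             return False
--         if i >j :
--             return True
--         if good(i,j) and isGood(i+1,j-1):
--             return True
--         for k in range(i+1,j,2):
--             if isGood(i,k) and isGood(k+1,j):
--                 return True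
--         return False
--     n = len(s)
--     @cache
--     def dfs(i):
--         if  i == n:
--             return ""
--         ret = s[i] + dfs(i+1)
--         for j in range(i+1,n):
--             if isGood(i,j):
--                 t = dfs(j+1)
--                 if ret >t:
--                     ret  =t
--         return ret
--     return dfs(0)
-- ===== SOURCE B (Python) =====
-- def lexicographicallySmallestString(s: str) -> str:
--     # Bottom-up tabulation: boolean removability table g[i][j] filled by interval
--     # length, then a suffix array best[i] built right-to-left; no recursion.
--     n = len(s)
--     o = [ord(c) for c in s]
--     g = [[False] * n for _ in range(n)]
--     for length in range(2, n + 1):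
--         for i in range(0, n - length + 1):
--             j = i + length - 1
--             d = abs(o[i] - o[j])
--             g[i][j] = ((d == 1 or d == 25) and (j == i + 1 or g[i + 1][j - 1])) \
--                 or any(g[i][k] and g[k + 1][j] for k in range(i + 1, j, 2))
--     best = [""] * (n + 1)
--     for i in range(n - 1, -1, -1):
--         ret = s[i] + best[i + 1]
--         for j in range(i + 1, n):
--             if g[i][j] and best[j + 1] < ret:
--                 ret = best[j + 1]
--         best[i] = ret
--     return best[0]
-- ===== Notes on version B (the rewrite author's own statement) =====
-- stated objective: alternative
-- what changed: Replaces A's two @cache top-down recursions by bottom-up tabulation: a removability table g[i][j] filled by increasing interval length, then a suffix array best[i] built right-to-left, returning best[0].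
import Mathlib
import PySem

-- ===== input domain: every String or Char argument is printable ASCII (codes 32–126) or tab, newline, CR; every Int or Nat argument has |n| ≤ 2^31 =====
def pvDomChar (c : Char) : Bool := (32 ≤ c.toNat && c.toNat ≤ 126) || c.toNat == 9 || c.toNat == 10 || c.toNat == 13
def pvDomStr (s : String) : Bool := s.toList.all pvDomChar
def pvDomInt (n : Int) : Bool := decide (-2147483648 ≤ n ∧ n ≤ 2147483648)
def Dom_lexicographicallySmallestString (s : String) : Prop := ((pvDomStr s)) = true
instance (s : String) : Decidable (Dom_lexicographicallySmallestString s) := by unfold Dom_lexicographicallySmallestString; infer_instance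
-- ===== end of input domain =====

-- B replaces A's two memoized top-down recursions by bottom-up tabulation (a removability
-- table filled by interval length, then a suffix-best array built right to left); same values.

-- ===== PORT A =====
-- A's inner helper good(i,j); indices are always in range when A evaluates it, so getD totalizes it
def goodA (c : List Char) (i j : Nat) : Bool :=
  let d : Int := ((c.getD i ' ').toNat : Int) - ((c.getD j ' ').toNat : Int)
  d.natAbs == 1 || d.natAbs == 25

-- A's isGood(i,j), including the j-(i%2) guard evaluated over Int exactly as Python does;
-- the for-k loop with early return is the `any` over range(i+1, j, 2)
def isGoodA (c : List Char) (i j : Nat) : Bool :=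
  if ((j : Int) - (i : Int) % 2) == 0 then false
  else if j < i then true
  else if goodA c i j && isGoodA c (i+1) (j-1) then true
  else (List.range' (i+1) ((j - (i+1) + 1) / 2) 2).attach.any
        (fun k => isGoodA c i k.1 && isGoodA c (k.1+1) j)
termination_by j + 1 - i
decreasing_by
  · omega
  · obtain ⟨m, _hm, hk⟩ := List.mem_range'.mp k.2; omega
  · obtain ⟨m, _hm, hk⟩ := List.mem_range'.mp k.2; omega

-- A's dfs(i); `if n ≤ i` totalizes Python's `i == n` (dfs is only reached with i ≤ n)
def dfsA (c : List Char) (n i : Nat) : String :=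
  if n ≤ i then ""
  else
    (List.range' (i+1) (n - (i+1)) 1).attach.foldl
      (fun ret j =>
        if isGoodA c i j.1 then
          let t := dfsA c n (j.1 + 1)
          if t < ret then t else ret
        else ret)
      (String.ofList (c.getD i ' ' :: (dfsA c n (i+1)).toList))
termination_by n - i
decreasing_by
  · obtain ⟨m, _hm, hj⟩ := List.mem_range'.mp j.2; omega
  · omega

def lexicographicallySmallestString (s : String) : String :=
  dfsA s.toList s.toList.length 0

-- ===== PORT B =====
-- Source B works over o = [ord(c) for c in s]
def adjB (o : List Nat) (i j : Nat) : Bool :=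
  let d : Int := (o.getD i 0 : Int) - (o.getD j 0 : Int)
  d.natAbs == 1 || d.natAbs == 25

-- the assignment g[i][j] = … of Source B, reading the table built so far
def cellB (g : Nat → Nat → Bool) (o : List Nat) (i j : Nat) : Bool :=
  (adjB o i j && (j == i + 1 || g (i+1) (j-1)))
    || (List.range' (i+1) ((j - (i+1) + 1) / 2) 2).any (fun k => g i k && g (k+1) j)

-- one iteration of Source B's `for length in …` loop: write every cell with j-i+1 = len, j < n
def stepLenB (o : List Nat) (n : Nat) (g : Nat → Nat → Bool) (len : Nat) : Nat → Nat → Bool :=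
  fun a b => if a + len = b + 1 ∧ b < n then cellB g o a b else g a b

def gTabB (o : List Nat) (n : Nat) : Nat → Nat → Bool :=
  (List.range' 2 (n + 1 - 2) 1).foldl (stepLenB o n) (fun _ _ => false)

-- one iteration of Source B's `for i in range(n-1,-1,-1)` loop: best[i] = minimized ret
def bestStepB (c : List Char) (g : Nat → Nat → Bool) (n : Nat) (best : Nat → String) (i : Nat) :
    Nat → String :=
  fun a =>
    if a = i then
      (List.range' (i+1) (n - (i+1)) 1).foldl
        (fun ret j => if g i j && decide (best (j+1) < ret) then best (j+1) else ret)
        (String.ofList (c.getD i ' ' :: (best (i+1)).toList))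
    else best a

def lexicographicallySmallestString_alt (s : String) : String :=
  let c := s.toList
  let n := c.length
  let o := c.map Char.toNat
  let g := gTabB o n
  let best := ((List.range n).reverse).foldl (bestStepB c g n) (fun _ => "")
  best 0

-- ===== PRECONDITION & SPEC =====
def Spec_lexicographicallySmallestString (s : String) (out : String) : Prop := out = lexicographicallySmallestString_alt s
instance (s : String) (out : String) : Decidable (Spec_lexicographicallySmallestString s out) := by unfold Spec_lexicographicallySmallestString; infer_instance

-- ===== CLAIM (what is proved, stated in full; the proofs are below) =====
def Claim_equal_lexicographicallySmallestString : Prop := ∀ (s : String), Dom_lexicographicallySmallestString s → Spec_lexicographicallySmallestString s (lexicographicallySmallestString s)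

-- ===== LEMMAS AND PROOFS =====

theorem pv_any_attach {α : Type} (l : List α) (f : α → Bool) :
    (l.attach.any fun x => f x.1) = l.any f := by
  induction l with
  | nil => rfl
  | cons a t ih => simp only [List.attach_cons, List.any_cons, List.any_map, Function.comp_def]
                   rw [← ih]

-- isGood on the diagonal is always False
theorem isGoodA_diag (c : List Char) (m : Nat) : isGoodA c m m = false := by
  rw [isGoodA]
  by_cases h : ((m : Int) - (m : Int) % 2) = 0
  · simp [h]
  · have h2 : ¬ m < m := by omega
    have h3 : goodA c m m = false := by simp [goodA]
    have h4 : m - (m+1) + 1 = 1 := by omega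
    simp [h, h3]

-- isGood(i+1, i) is always True (the i > j base case; the guard never fires there)
theorem isGoodA_succ_self (c : List Char) (i : Nat) : isGoodA c (i+1) i = true := by
  rw [isGoodA]
  have h1 : (((i : Nat) : Int) - (((i+1) : Nat) : Int) % 2 == 0) = false := by
    simp only [beq_eq_false_iff_ne, ne_eq]
    push_cast
    omega
  rw [h1]
  simp

-- the invariant of Source B's length loop
def InvG (c : List Char) (n L : Nat) (t : Nat → Nat → Bool) : Prop :=
  ∀ a b, t a b = if a < b ∧ b < n ∧ b + 1 ≤ a + L then isGoodA c a b else false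

theorem cellB_eq (c : List Char) (n L : Nat) (t : Nat → Nat → Bool)
    (hn : n = c.length) (ht : InvG c n L t) (i j : Nat)
    (hij : i < j) (hjn : j < n) (hspan : j = i + L) :
    cellB t (c.map Char.toNat) i j = isGoodA c i j := by
  have hguard : (((j : Nat) : Int) - ((i : Nat) : Int) % 2 == 0) = false := by
    simp only [beq_eq_false_iff_ne, ne_eq]
    omega
  have hi : i < c.length := by omega
  have hj : j < c.length := by omega
  have hadj : adjB (c.map Char.toNat) i j = goodA c i j := by
    unfold adjB goodA
    rw [List.getD_eq_getElem _ _ (by simpa using hi), List.getD_eq_getElem _ _ hi,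
        List.getD_eq_getElem _ _ (by simpa using hj), List.getD_eq_getElem _ _ hj,
        List.getElem_map, List.getElem_map]
  have hpair : (j == i+1 || t (i+1) (j-1)) = isGoodA c (i+1) (j-1) := by
    by_cases hj1 : j = i+1
    · subst hj1
      simp [isGoodA_succ_self]
    · have hne : (j == i+1) = false := by simp [hj1]
      rw [hne, Bool.false_or, ht (i+1) (j-1)]
      by_cases hd : i+1 < j-1
      · rw [if_pos ⟨hd, by omega, by omega⟩]
      · have hj2 : j - 1 = i + 1 := by omega
        rw [if_neg (by omega), hj2, isGoodA_diag]
  have hany : (List.range' (i+1) ((j - (i+1) + 1) / 2) 2).any (fun k => t i k && t (k+1) j)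
      = (List.range' (i+1) ((j - (i+1) + 1) / 2) 2).attach.any
          (fun k => isGoodA c i k.1 && isGoodA c (k.1+1) j) := by
    rw [pv_any_attach _ (fun k => isGoodA c i k && isGoodA c (k+1) j)]
    apply PySem.List.any_congr_mem
    intro k hk
    obtain ⟨m, hm, hkm⟩ := List.mem_range'.mp hk
    have h1 : t i k = isGoodA c i k := by
      rw [ht, if_pos ⟨by omega, by omega, by omega⟩]
    have h2 : t (k+1) j = isGoodA c (k+1) j := by
      by_cases hkj1 : k+1 < j
      · rw [ht, if_pos ⟨hkj1, hjn, by omega⟩]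
      · have hkj2 : k+1 = j := by omega
        rw [ht, if_neg (by omega), hkj2, isGoodA_diag]
    rw [h1, h2]
  unfold cellB
  rw [hadj, hpair, hany]
  conv_rhs => rw [isGoodA]
  rw [hguard]
  simp only [Bool.false_eq_true, if_false]
  rw [if_neg (by omega : ¬ j < i)]
  cases hcase : (goodA c i j && isGoodA c (i+1) (j-1)) <;> simp

theorem stepLenB_inv (c : List Char) (n L : Nat) (t : Nat → Nat → Bool)
    (hn : n = c.length) (hL : 1 ≤ L) (ht : InvG c n L t) :
    InvG c n (L+1) (stepLenB (c.map Char.toNat) n t (L+1)) := by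
  intro a b
  unfold stepLenB
  by_cases hc : a + (L+1) = b + 1 ∧ b < n
  · rw [if_pos hc, cellB_eq c n L t hn ht a b (by omega) hc.2 (by omega),
        if_pos ⟨by omega, hc.2, by omega⟩]
  · rw [if_neg hc, ht a b]
    by_cases h2 : a < b ∧ b < n ∧ b + 1 ≤ a + L
    · rw [if_pos h2, if_pos ⟨h2.1, h2.2.1, by omega⟩]
    · rw [if_neg h2, if_neg ?_]
      rintro ⟨x1, x2, x3⟩
      have hb1 : ¬ (b + 1 ≤ a + L) := fun hbb => h2 ⟨x1, x2, hbb⟩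
      exact hc ⟨by omega, x2⟩

theorem gTabB_foldl (c : List Char) (n : Nat) (hn : n = c.length) :
    ∀ (k L : Nat) (t : Nat → Nat → Bool), 1 ≤ L → InvG c n L t →
      InvG c n (L + k) ((List.range' (L+1) k 1).foldl (stepLenB (c.map Char.toNat) n) t) := by
  intro k
  induction k with
  | zero =>
    intro L t _ ht
    simpa using ht
  | succ k ih =>
    intro L t hL ht
    rw [List.range'_succ, List.foldl_cons]
    have h := ih (L+1) (stepLenB (c.map Char.toNat) n t (L+1)) (by omega)
      (stepLenB_inv c n L t hn hL ht)
    have heq : L + 1 + k = L + (k + 1) := by omega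
    rw [heq] at h
    exact h

theorem gTabB_eq (c : List Char) (n : Nat) (hn : n = c.length) (i j : Nat)
    (hij : i < j) (hjn : j < n) :
    gTabB (c.map Char.toNat) n i j = isGoodA c i j := by
  have h0 : InvG c n 1 (fun _ _ => false) := by
    intro a b
    rw [if_neg]
    rintro ⟨x1, x2, x3⟩
    omega
  have h := gTabB_foldl c n hn (n + 1 - 2) 1 _ (le_refl 1) h0
  have heq : 1 + (n + 1 - 2) = n := by omega
  rw [heq] at h
  unfold gTabB
  rw [h i j, if_pos ⟨hij, hjn, by omega⟩]

-- the invariant of Source B's best loop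
def InvB (c : List Char) (n m : Nat) (best : Nat → String) : Prop :=
  ∀ a, m ≤ a → best a = dfsA c n a

theorem bestStepB_inv (c : List Char) (n : Nat) (hn : n = c.length)
    (best : Nat → String) (i : Nat) (hi : i < n) (hb : InvB c n (i+1) best) :
    InvB c n i (bestStepB c (gTabB (c.map Char.toNat) n) n best i) := by
  intro a ha
  unfold bestStepB
  by_cases hai : a = i
  · subst hai
    rw [if_pos rfl]
    conv_rhs => rw [dfsA]
    rw [if_neg (by omega : ¬ n ≤ a), hb (a+1) (le_refl _), ← List.foldl_attach]
    apply PySem.List.foldl_congr_mem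
    intro ret x hx
    obtain ⟨m, hm, hxm⟩ := List.mem_range'.mp x.2
    rw [gTabB_eq c n hn a x.1 (by omega) (by omega), hb (x.1+1) (by omega)]
    cases hg : isGoodA c a x.1 <;> simp
  · rw [if_neg hai, hb a (by omega)]

theorem bestFold (c : List Char) (n : Nat) (hn : n = c.length) :
    ∀ k m, m + k = n →
      InvB c n m ((List.range' m k 1).reverse.foldl
        (bestStepB c (gTabB (c.map Char.toNat) n) n) (fun _ => "")) := by
  intro k
  induction k with
  | zero =>
    intro m hm a ha
    rw [dfsA, if_pos (by omega : n ≤ a)]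
    simp
  | succ k ih =>
    intro m hm
    rw [List.range'_succ, List.reverse_cons, List.foldl_append, List.foldl_cons, List.foldl_nil]
    exact bestStepB_inv c n hn _ m (by omega) (ih (m+1) (by omega))

-- ===== VERDICT (by name: the statement is the Claim_ definition above) =====
theorem lexicographicallySmallestString_spec : Claim_equal_lexicographicallySmallestString := by
  intro s _
  unfold Spec_lexicographicallySmallestString lexicographicallySmallestString
    lexicographicallySmallestString_alt
  show dfsA s.toList s.toList.length 0 =
    (((List.range s.toList.length).reverse).foldl
      (bestStepB s.toList (gTabB (s.toList.map Char.toNat) s.toList.length) s.toList.length)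
      (fun _ => "")) 0
  rw [List.range_eq_range']
  exact (bestFold s.toList s.toList.length rfl s.toList.length 0 (by omega) 0 (by omega)).symm
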